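-- pv_equiv track=rewrite | github.com/samduanx/mujica_f1_modeler | src/incidents/unlapping.py | check_f1_article_55_compliance
-- ===== SOURCE A (Python) =====
-- from typing import Dict, List, Optional, Set, Tuple
--
-- def check_f1_article_55_compliance(
--     sc_duration_laps: int,
--     lapped_cars_count: int,
--     track_conditions: str,
--     laps_remaining: int,
-- ) -> Tuple[bool, List[str]]:
--     """
--     Check compliance with F1 Sporting Regulations Article 55.14-55.15.
--
--     Article 55.14: Lapped cars must pass the cars on the lead lap and the Safety Car
--     Article 55.15: Once the last lapped car has passed the leader, the Safety Car
--                    will return to the pits at the end of the following lap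
--
--     Args:
--         sc_duration_laps: Number of laps SC has been deployed
--         lapped_cars_count: Number of cars that are lapped
--         track_conditions: Current track conditions
--         laps_remaining: Laps remaining in race
--
--     Returns:
--         Tuple of (is_compliant, list_of_requirements_met)
--     """
--     requirements = []
--
--     # Minimum SC duration (typically 3 laps for track cleanup)
--     if sc_duration_laps >= 3:
--         requirements.append("Minimum SC duration met")
--     else:
--         requirements.append(f"SC duration insufficient ({sc_duration_laps}/3 laps)")
--
--     # Lapped cars exist
--     if lapped_cars_count > 0:
--         requirements.append("Lapped cars exist")
--     else:
--         requirements.append("No lapped cars")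
--
--     # Track conditions permit
--     if track_conditions not in ["wet", "heavy_rain", "storm"]:
--         requirements.append("Track conditions safe")
--     else:
--         requirements.append(f"Unsafe track conditions: {track_conditions}")
--
--     # Sufficient laps remaining
--     min_laps_needed = sc_duration_laps + 3
--     if laps_remaining >= min_laps_needed:
--         requirements.append("Sufficient laps remaining")
--     else:
--         requirements.append(f"Insufficient laps ({laps_remaining} < {min_laps_needed})")
--
--     is_compliant = all(
--         req.startswith(("Minimum", "Lapped", "Track", "Sufficient"))
--         and "insufficient" not in req.lower()
--         and "unsafe" not in req.lower()
--         and "no " not in req.lower()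
--         for req in requirements
--     )
--
--     return is_compliant, requirements
-- ===== SOURCE B (Python) =====
-- def check_f1_article_55_compliance(
--     sc_duration_laps: int,
--     lapped_cars_count: int,
--     track_conditions: str,
--     laps_remaining: int,
-- ):
--     min_laps_needed = sc_duration_laps + 3
--     checks = [
--         (sc_duration_laps >= 3,
--          "Minimum SC duration met",
--          f"SC duration insufficient ({sc_duration_laps}/3 laps)"),
--         (lapped_cars_count > 0,
--          "Lapped cars exist",
--          "No lapped cars"),
--         (track_conditions not in ("wet", "heavy_rain", "storm"),
--          "Track conditions safe",
--          f"Unsafe track conditions: {track_conditions}"),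
--         (laps_remaining >= min_laps_needed,
--          "Sufficient laps remaining",
--          f"Insufficient laps ({laps_remaining} < {min_laps_needed})"),
--     ]
--     requirements = [pass_msg if cond else fail_msg for cond, pass_msg, fail_msg in checks]
--     is_compliant = all(cond for cond, _, _ in checks)
--     return is_compliant, requirements
-- ===== Notes on version B (the rewrite author's own statement) =====
-- stated objective: simpler
-- what changed: B records each of the four rule conditions as a raw boolean in one (condition, pass_msg, fail_msg) table and computes the verdict as the conjunction of those booleans, instead of A's re-parsing of the built message strings with startswith/lower substring checks.
import Mathlib
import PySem

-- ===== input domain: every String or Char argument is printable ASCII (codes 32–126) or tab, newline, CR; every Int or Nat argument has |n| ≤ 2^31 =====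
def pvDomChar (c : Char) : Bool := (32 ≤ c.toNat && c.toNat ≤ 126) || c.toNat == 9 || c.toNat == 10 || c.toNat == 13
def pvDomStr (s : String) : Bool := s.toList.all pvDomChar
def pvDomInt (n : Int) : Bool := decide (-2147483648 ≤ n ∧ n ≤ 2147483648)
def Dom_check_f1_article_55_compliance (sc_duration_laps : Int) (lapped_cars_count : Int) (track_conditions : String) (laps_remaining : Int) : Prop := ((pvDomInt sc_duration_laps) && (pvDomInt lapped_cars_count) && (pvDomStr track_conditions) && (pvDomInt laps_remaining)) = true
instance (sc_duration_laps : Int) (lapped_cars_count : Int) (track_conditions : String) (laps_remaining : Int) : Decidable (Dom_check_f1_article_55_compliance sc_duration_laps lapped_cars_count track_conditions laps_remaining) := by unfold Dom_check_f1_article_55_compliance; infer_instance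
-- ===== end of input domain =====

-- B replaces A's string re-parsing verdict (startswith/lower substring checks over the built
-- messages) by a single table of (condition, pass_msg, fail_msg) rows read twice; objective: simpler.

-- ===== PORT A =====
-- the generator-expression body of Python A's `all(...)`
def pvReqOk (req : String) : Bool :=
  (PySem.Str.startswith req "Minimum" || PySem.Str.startswith req "Lapped" ||
   PySem.Str.startswith req "Track" || PySem.Str.startswith req "Sufficient")
  && !(PySem.Str.isIn "insufficient" (PySem.Str.lower req))
  && !(PySem.Str.isIn "unsafe" (PySem.Str.lower req))
  && !(PySem.Str.isIn "no " (PySem.Str.lower req))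

def check_f1_article_55_compliance (sc_duration_laps : Int) (lapped_cars_count : Int) (track_conditions : String) (laps_remaining : Int) : Bool × List String :=
  let requirements : List String := []
  let requirements :=
    if sc_duration_laps ≥ 3 then requirements ++ ["Minimum SC duration met"]
    else requirements ++ ["SC duration insufficient (" ++ (PySem.Int.toStr sc_duration_laps ++ "/3 laps)")]
  let requirements :=
    if lapped_cars_count > 0 then requirements ++ ["Lapped cars exist"]
    else requirements ++ ["No lapped cars"]
  let requirements :=
    if !(["wet", "heavy_rain", "storm"].contains track_conditions) then requirements ++ ["Track conditions safe"]
    else requirements ++ ["Unsafe track conditions: " ++ track_conditions]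
  let min_laps_needed := sc_duration_laps + 3
  let requirements :=
    if laps_remaining ≥ min_laps_needed then requirements ++ ["Sufficient laps remaining"]
    else requirements ++ ["Insufficient laps (" ++ (PySem.Int.toStr laps_remaining ++ (" < " ++ (PySem.Int.toStr min_laps_needed ++ ")")))]
  let is_compliant := requirements.all pvReqOk
  (is_compliant, requirements)

-- ===== PORT B =====
def check_f1_article_55_compliance_alt (sc_duration_laps : Int) (lapped_cars_count : Int) (track_conditions : String) (laps_remaining : Int) : Bool × List String :=
  let min_laps_needed := sc_duration_laps + 3
  let checks : List (Bool × String × String) :=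
    [ (decide (sc_duration_laps ≥ 3),
       "Minimum SC duration met",
       "SC duration insufficient (" ++ (PySem.Int.toStr sc_duration_laps ++ "/3 laps)")),
      (decide (lapped_cars_count > 0),
       "Lapped cars exist",
       "No lapped cars"),
      (!(["wet", "heavy_rain", "storm"].contains track_conditions),
       "Track conditions safe",
       "Unsafe track conditions: " ++ track_conditions),
      (decide (laps_remaining ≥ min_laps_needed),
       "Sufficient laps remaining",
       "Insufficient laps (" ++ (PySem.Int.toStr laps_remaining ++ (" < " ++ (PySem.Int.toStr min_laps_needed ++ ")")))) ]
  let requirements := checks.map (fun c => if c.1 then c.2.1 else c.2.2)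
  let is_compliant := checks.all (·.1)
  (is_compliant, requirements)

-- ===== PRECONDITION & SPEC =====
def Spec_check_f1_article_55_compliance (sc_duration_laps : Int) (lapped_cars_count : Int) (track_conditions : String) (laps_remaining : Int) (out : Bool × List String) : Prop := out = check_f1_article_55_compliance_alt sc_duration_laps lapped_cars_count track_conditions laps_remaining
instance (sc_duration_laps : Int) (lapped_cars_count : Int) (track_conditions : String) (laps_remaining : Int) (out : Bool × List String) : Decidable (Spec_check_f1_article_55_compliance sc_duration_laps lapped_cars_count track_conditions laps_remaining out) := by unfold Spec_check_f1_article_55_compliance; infer_instance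

-- ===== CLAIM (what is proved, stated in full; the proofs are below) =====
def Claim_equal_check_f1_article_55_compliance : Prop := ∀ (sc_duration_laps : Int) (lapped_cars_count : Int) (track_conditions : String) (laps_remaining : Int), Dom_check_f1_article_55_compliance sc_duration_laps lapped_cars_count track_conditions laps_remaining → Spec_check_f1_article_55_compliance sc_duration_laps lapped_cars_count track_conditions laps_remaining (check_f1_article_55_compliance sc_duration_laps lapped_cars_count track_conditions laps_remaining)

-- ===== LEMMAS AND PROOFS =====

-- a prefix test that already fails on the first hlen characters fails on any extension
lemma startswith_append_false (pre x p : List Char) (hlen : p.length ≤ pre.length)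
    (h : PySem.Chars.startswith pre p = false) :
    PySem.Chars.startswith (pre ++ x) p = false := by
  by_contra hc
  have ht : PySem.Chars.startswith (pre ++ x) p = true := by
    revert hc; cases PySem.Chars.startswith (pre ++ x) p <;> simp
  have hp : p <+: pre ++ x := (PySem.Chars.startswith_iff _ _).1 ht
  have hpre : p <+: pre := by
    have he := List.prefix_iff_eq_take.1 hp
    rw [List.take_append_of_le_length hlen] at he
    exact he ▸ List.take_prefix _ _
  have := (PySem.Chars.startswith_iff pre p).2 hpre
  simp [h] at this

-- any message that starts with a ≥10-char literal prefix matching none of A's four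
-- startswith alternatives fails A's generator check, whatever follows the prefix
lemma pvReqOk_append_false (pre x : String) (hlen : 10 ≤ pre.toList.length)
    (hM : PySem.Chars.startswith pre.toList "Minimum".toList = false)
    (hL : PySem.Chars.startswith pre.toList "Lapped".toList = false)
    (hT : PySem.Chars.startswith pre.toList "Track".toList = false)
    (hS : PySem.Chars.startswith pre.toList "Sufficient".toList = false) :
    pvReqOk (pre ++ x) = false := by
  have l1 := startswith_append_false pre.toList x.toList "Minimum".toList (by exact le_trans (by decide) hlen) hM
  have l2 := startswith_append_false pre.toList x.toList "Lapped".toList (by exact le_trans (by decide) hlen) hL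
  have l3 := startswith_append_false pre.toList x.toList "Track".toList (by exact le_trans (by decide) hlen) hT
  have l4 := startswith_append_false pre.toList x.toList "Sufficient".toList (by exact le_trans (by decide) hlen) hS
  have hsw : (PySem.Str.startswith (pre ++ x) "Minimum" || PySem.Str.startswith (pre ++ x) "Lapped" ||
      PySem.Str.startswith (pre ++ x) "Track" || PySem.Str.startswith (pre ++ x) "Sufficient") = false := by
    simp only [PySem.Str.startswith_eq, String.toList_append]
    rw [l1, l2, l3, l4]
    rfl
  unfold pvReqOk
  rw [hsw]
  simp

lemma reqOk_fail1 (n : Int) :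
    pvReqOk ("SC duration insufficient (" ++ (PySem.Int.toStr n ++ "/3 laps)")) = false :=
  pvReqOk_append_false _ _ (by decide) (by decide) (by decide) (by decide) (by decide)

lemma reqOk_fail3_wet : pvReqOk "Unsafe track conditions: wet" = false := by decide
lemma reqOk_fail3_rain : pvReqOk "Unsafe track conditions: heavy_rain" = false := by decide
lemma reqOk_fail3_storm : pvReqOk "Unsafe track conditions: storm" = false := by decide

lemma reqOk_fail4 (a b : Int) :
    pvReqOk ("Insufficient laps (" ++ (PySem.Int.toStr a ++ (" < " ++ (PySem.Int.toStr b ++ ")")))) = false :=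
  pvReqOk_append_false _ _ (by decide) (by decide) (by decide) (by decide) (by decide)

lemma reqOk_pass1 : pvReqOk "Minimum SC duration met" = true := by decide
lemma reqOk_pass2 : pvReqOk "Lapped cars exist" = true := by decide
lemma reqOk_pass3 : pvReqOk "Track conditions safe" = true := by decide
lemma reqOk_pass4 : pvReqOk "Sufficient laps remaining" = true := by decide
lemma reqOk_fail2 : pvReqOk "No lapped cars" = false := by decide

-- ===== VERDICT (by name: the statement is the Claim_ definition above) =====
theorem check_f1_article_55_compliance_spec : Claim_equal_check_f1_article_55_compliance := by
  intro sc lc tc lr _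
  unfold Spec_check_f1_article_55_compliance
  unfold check_f1_article_55_compliance check_f1_article_55_compliance_alt
  by_cases h1 : sc ≥ 3 <;> by_cases h2 : lc > 0 <;>
    by_cases hw : tc = "wet" <;> by_cases hh : tc = "heavy_rain" <;> by_cases hs : tc = "storm" <;>
    by_cases h4 : lr ≥ sc + 3 <;>
    first
    | (exfalso; subst_vars; simp_all; done)
    | simp [h1, h2, hw, hh, hs, h4, reqOk_fail1, reqOk_fail2, reqOk_fail3_wet, reqOk_fail3_rain, reqOk_fail3_storm, reqOk_fail4,
        reqOk_pass1, reqOk_pass2, reqOk_pass3, reqOk_pass4]
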